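-- pv_equiv track=rewrite | github.com/AungKhantMinnnnN/CSCI361-Cryptography | Assignment1/Kamasutra.py | createCipherMapping
-- ===== SOURCE A (Python) =====
-- def createCipherMapping(key):
--     cipherMap = {}
--     keyLength = len(key)
--
--     # Initialize identity mapping
--     for i in range(26):
--         char = chr(ord('a') + i)
--         cipherMap[char] = char
--
--     # Create pairing based on key
--     for i in range(keyLength // 2):
--         first = key[i].lower()
--         second = key[keyLength - 1 - i].lower()
--
--         if 'a' <= first <= 'z' and 'a' <= second <= 'z':
--             cipherMap[first] = second
--             cipherMap[second] = first
--
--     return cipherMap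
-- ===== SOURCE B (Python) =====
-- def createCipherMapping(key):
--     n = len(key)
--     pairs = [(key[i].lower(), key[n - 1 - i].lower()) for i in range(n // 2)]
--     cipherMap = {}
--     for c in map(chr, range(ord('a'), ord('z') + 1)):
--         image = c
--         for a, b in reversed(pairs):
--             if 'a' <= a <= 'z' and 'a' <= b <= 'z' and (a == c or b == c):
--                 image = b if a == c else a
--                 break
--         cipherMap[c] = image
--     return cipherMap
-- ===== Notes on version B (the rewrite author's own statement) =====
-- stated objective: alternative
-- what changed: B maintains no cipher dictionary at all: it materialises the list of (key[i], key[n-1-i]) letter pairs once and then, for each of the 26 letters independently, scans that list backwards for the last valid pair mentioning the letter and emits the partner (or the letter itself) — a last-write-wins search replacing A's identity-init-then-override mutation of a dict.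
import Mathlib
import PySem

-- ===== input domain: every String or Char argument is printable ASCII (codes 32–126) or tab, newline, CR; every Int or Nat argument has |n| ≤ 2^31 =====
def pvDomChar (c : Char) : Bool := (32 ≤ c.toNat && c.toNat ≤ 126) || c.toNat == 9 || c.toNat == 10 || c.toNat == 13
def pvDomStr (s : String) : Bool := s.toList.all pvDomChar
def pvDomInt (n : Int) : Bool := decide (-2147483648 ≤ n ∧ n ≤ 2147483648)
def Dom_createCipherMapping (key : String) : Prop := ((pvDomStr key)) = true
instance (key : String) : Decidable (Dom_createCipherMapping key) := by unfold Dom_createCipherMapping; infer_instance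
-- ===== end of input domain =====

-- B keeps no cipher dictionary: it lists the key's letter pairs once and, per letter, finds the
-- last valid pair mentioning it by a backward search (objective: alternative, same result).

-- ===== PORT A =====
-- Python compares the 1-char strings key[i].lower() with 'a'..'z'; on singletons this is exactly
-- the character comparison used here, and the dict keys stay the 1-char strings.
def createCipherMapping (key : String) : List (String × String) :=
  let cipherMap : PySem.Dict String String := PySem.Dict.empty
  let keyLength : Int := PySem.Str.len key
  -- for i in range(26): cipherMap[chr(ord('a')+i)] = chr(ord('a')+i)
  let cipherMap := (PySem.List.pyRange 0 26 1).foldl (fun d i =>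
    let char := String.singleton (Char.ofNat ('a'.toNat + i.toNat))
    d.insert char char) cipherMap
  -- for i in range(keyLength // 2): ...
  let cipherMap := (PySem.List.pyRange 0 (PySem.Int.floordiv keyLength 2) 1).foldl (fun d i =>
    match PySem.List.pyGet? key.toList i, PySem.List.pyGet? key.toList (keyLength - 1 - i) with
    | some c1, some c2 =>
      let first := PySem.Chars.lowerChar c1
      let second := PySem.Chars.lowerChar c2
      if 'a' ≤ first ∧ first ≤ 'z' ∧ 'a' ≤ second ∧ second ≤ 'z' then
        (d.insert (String.singleton first) (String.singleton second)).insert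
          (String.singleton second) (String.singleton first)
      else d
    | _, _ => d)  -- unreachable: both indices are in range for every i of the range
    cipherMap
  cipherMap.items

-- ===== PORT B =====
def createCipherMapping_alt (key : String) : List (String × String) :=
  let n : Int := PySem.Str.len key
  -- pairs = [(key[i].lower(), key[n-1-i].lower()) for i in range(n // 2)]
  let pairs : List (Char × Char) := (PySem.List.pyRange 0 (PySem.Int.floordiv n 2) 1).map (fun i =>
    match PySem.List.pyGet? key.toList i with
    | none => ('a', 'a')  -- unreachable: both indices are in range for every i of the range
    | some a =>
      match PySem.List.pyGet? key.toList (n - 1 - i) with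
      | none => ('a', 'a')
      | some b => (PySem.Chars.lowerChar a, PySem.Chars.lowerChar b))
  -- for c in 'a'..'z': scan reversed(pairs) for the last valid pair mentioning c (break = find?)
  "abcdefghijklmnopqrstuvwxyz".toList.map (fun c =>
    let image := match pairs.reverse.find? (fun p =>
        decide ('a' ≤ p.1 ∧ p.1 ≤ 'z' ∧ 'a' ≤ p.2 ∧ p.2 ≤ 'z') && (p.1 == c || p.2 == c)) with
      | some p => if p.1 == c then p.2 else p.1
      | none => c
    (String.singleton c, String.singleton image))

-- ===== PRECONDITION & SPEC =====
def Spec_createCipherMapping (key : String) (out : List (String × String)) : Prop := out = createCipherMapping_alt key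
instance (key : String) (out : List (String × String)) : Decidable (Spec_createCipherMapping key out) := by unfold Spec_createCipherMapping; infer_instance

-- ===== CLAIM (what is proved, stated in full; the proofs are below) =====
def Claim_equal_createCipherMapping : Prop := ∀ (key : String), Dom_createCipherMapping key → Spec_createCipherMapping key (createCipherMapping key)

-- ===== LEMMAS AND PROOFS =====

/-- The 26 lowercase letters as characters. -/
def pvLc : List Char := "abcdefghijklmnopqrstuvwxyz".toList

/-- The 26 lowercase letters as 1-char strings (A's dict keys). -/
def pvLetters : List String := pvLc.map String.singleton

/-- A's pair-processing step. -/
def pvStep (d : PySem.Dict String String) (p : Char × Char) : PySem.Dict String String :=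
  if 'a' ≤ p.1 ∧ p.1 ≤ 'z' ∧ 'a' ≤ p.2 ∧ p.2 ≤ 'z' then
    (d.insert (String.singleton p.1) (String.singleton p.2)).insert
      (String.singleton p.2) (String.singleton p.1)
  else d

/-- B's search predicate: valid pair mentioning c. -/
def pvQ (c : Char) (p : Char × Char) : Bool :=
  decide ('a' ≤ p.1 ∧ p.1 ≤ 'z' ∧ 'a' ≤ p.2 ∧ p.2 ≤ 'z') && (p.1 == c || p.2 == c)

/-- The j-th processed pair: (key[j].lower(), key[n-1-j].lower()). -/
def pvPairAt (cs : List Char) (j : Nat) : Char × Char :=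
  (PySem.Chars.lowerChar (cs.getD j 'a'), PySem.Chars.lowerChar (cs.getD (cs.length - 1 - j) 'a'))

theorem pvSingleton_inj {a b : Char} (h : String.singleton a = String.singleton b) : a = b := by
  have := congrArg String.toList h
  simpa using this

theorem pvOfNat_mem (n : Nat) (h1 : 97 ≤ n) (h2 : n ≤ 122) : Char.ofNat n ∈ pvLc := by
  interval_cases n <;> decide

theorem pvMem_letters {c : Char} (h1 : 'a' ≤ c) (h2 : c ≤ 'z') :
    String.singleton c ∈ pvLetters := by
  have hc : c ∈ pvLc := by
    have hb1 : 97 ≤ c.toNat := by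
      have := Char.le_def.mp h1; exact UInt32.le_iff_toNat_le.mp this
    have hb2 : c.toNat ≤ 122 := by
      have := Char.le_def.mp h2; exact UInt32.le_iff_toNat_le.mp this
    have := pvOfNat_mem c.toNat hb1 hb2
    rwa [Char.ofNat_toNat] at this
  exact List.mem_map_of_mem hc

theorem pvIns (d s : PySem.Dict String String)
    (h : d.items = pvLetters.map (fun c => (c, s.getD c c))) (A B : String)
    (hA : A ∈ pvLetters) :
    (d.insert A B).items = pvLetters.map (fun c => (c, (s.insert A B).getD c c)) := by
  have hkeys : d.keys = pvLetters := by
    simp only [PySem.Dict.keys, h, List.map_map]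
    exact List.map_id _
  have hc : d.contains A = true := by
    rw [PySem.Dict.contains_eq_decide_mem_keys, hkeys]; simpa using hA
  rw [PySem.Dict.items_insert_of_contains d B hc, h, List.map_map]
  apply List.map_congr_left
  intro c _
  by_cases hEq : c = A
  · subst hEq; simp
  · simp only [Function.comp]
    rw [PySem.Dict.getD_insert]
    simp [hEq, (by simpa using hEq : (c == A) = false)]

theorem pvInv (ps : List (Char × Char)) (d s : PySem.Dict String String)
    (h : d.items = pvLetters.map (fun c => (c, s.getD c c))) :
    (ps.foldl pvStep d).items = pvLetters.map (fun c => (c, (ps.foldl pvStep s).getD c c)) := by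
  induction ps generalizing d s with
  | nil => exact h
  | cons p ps ih =>
    simp only [List.foldl_cons]
    apply ih
    unfold pvStep
    split_ifs with hc
    · obtain ⟨h1, h2, h3, h4⟩ := hc
      exact pvIns _ _ (pvIns d s h _ _ (pvMem_letters h1 h2)) _ _ (pvMem_letters h3 h4)
    · exact h

/-- The dict entry after A's pair fold equals B's backward search over the pair list. -/
theorem pvSearch (c : Char) (ps : List (Char × Char)) (s : PySem.Dict String String) :
    (ps.foldl pvStep s).getD (String.singleton c) (String.singleton c) =
      match ps.reverse.find? (pvQ c) with
      | some p => String.singleton (if p.1 == c then p.2 else p.1)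
      | none => s.getD (String.singleton c) (String.singleton c) := by
  induction ps using List.reverseRecOn with
  | nil => simp
  | append_singleton qs p ih =>
    rw [List.foldl_append, List.reverse_append]
    simp only [List.foldl_cons, List.foldl_nil, List.reverse_singleton, List.singleton_append]
    by_cases hq : pvQ c p = true
    · rw [List.find?_cons_of_pos hq]
      unfold pvQ at hq
      have hv : 'a' ≤ p.1 ∧ p.1 ≤ 'z' ∧ 'a' ≤ p.2 ∧ p.2 ≤ 'z' :=
        of_decide_eq_true (Bool.and_elim_left hq)
      have hm : (p.1 == c || p.2 == c) = true := Bool.and_elim_right hq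
      unfold pvStep
      rw [if_pos hv, PySem.Dict.getD_insert, PySem.Dict.getD_insert]
      by_cases h2 : c = p.2
      · rw [if_pos (by rw [h2])]
        by_cases h1 : p.1 = c
        · simp [h1, h2]
        · simp [h1]
      · have h1 : p.1 = c := by
          rcases Bool.or_eq_true_iff.mp hm with h | h
          · exact beq_iff_eq.mp h
          · exact absurd (beq_iff_eq.mp h).symm h2
        rw [if_neg (fun h => h2 (pvSingleton_inj h)), if_pos (by rw [h1])]
        simp [h1]
    · rw [List.find?_cons_of_neg hq, ← ih]
      unfold pvQ at hq
      unfold pvStep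
      by_cases hv : 'a' ≤ p.1 ∧ p.1 ≤ 'z' ∧ 'a' ≤ p.2 ∧ p.2 ≤ 'z'
      · rw [if_pos hv]
        have hm : ¬ ((p.1 == c || p.2 == c) = true) := fun h => hq (by simp [decide_eq_true hv, h])
        have h1 : ¬ p.1 = c := fun e => hm (by simp [e])
        have h2 : ¬ p.2 = c := fun e => hm (by simp [e])
        rw [PySem.Dict.getD_insert, PySem.Dict.getD_insert,
          if_neg (fun h => h2 (pvSingleton_inj h).symm),
          if_neg (fun h => h1 (pvSingleton_inj h).symm)]
      · rw [if_neg hv]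

theorem pvAfold (key : String) (d0 : PySem.Dict String String) :
    (PySem.List.pyRange 0 (PySem.Int.floordiv (PySem.Str.len key) 2) 1).foldl (fun d i =>
      match PySem.List.pyGet? key.toList i, PySem.List.pyGet? key.toList (PySem.Str.len key - 1 - i) with
      | some c1, some c2 =>
        let first := PySem.Chars.lowerChar c1
        let second := PySem.Chars.lowerChar c2
        if 'a' ≤ first ∧ first ≤ 'z' ∧ 'a' ≤ second ∧ second ≤ 'z' then
          (d.insert (String.singleton first) (String.singleton second)).insert
            (String.singleton second) (String.singleton first)
        else d
      | _, _ => d) d0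
    = ((List.range (key.toList.length / 2)).map (pvPairAt key.toList)).foldl pvStep d0 := by
  have hlen : PySem.Str.len key = (key.toList.length : Int) := rfl
  have hm : PySem.Int.floordiv (PySem.Str.len key) 2 = ((key.toList.length / 2 : Nat) : Int) := by
    rw [hlen]; simp [PySem.Int.floordiv, Int.fdiv_eq_ediv]
  rw [hm, PySem.List.pyRange_one, List.foldl_map, List.foldl_map]
  apply PySem.List.foldl_congr_mem
  intro acc k hk
  have hk' : k < key.toList.length / 2 := by
    have := List.mem_range.mp hk; omega
  have hkn : k < key.toList.length := lt_of_lt_of_le hk' (Nat.div_le_self _ _)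
  have h1 : (0 : Int) + (k : Int) = ((k : Nat) : Int) := by omega
  have h2 : PySem.Str.len key - 1 - (k : Int) = ((key.toList.length - 1 - k : Nat) : Int) := by
    rw [hlen]; omega
  rw [h1, h2, PySem.List.pyGet?_natCast, PySem.List.pyGet?_natCast,
    List.getElem?_eq_getElem hkn, List.getElem?_eq_getElem (show key.toList.length - 1 - k < key.toList.length by omega)]
  simp only [pvStep, pvPairAt, List.getD_eq_getElem _ _ hkn,
    List.getD_eq_getElem _ _ (show key.toList.length - 1 - k < key.toList.length by omega)]

theorem pvBpairs (key : String) :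
    (PySem.List.pyRange 0 (PySem.Int.floordiv (PySem.Str.len key) 2) 1).map (fun i =>
      match PySem.List.pyGet? key.toList i with
      | none => ('a', 'a')
      | some a =>
        match PySem.List.pyGet? key.toList (PySem.Str.len key - 1 - i) with
        | none => ('a', 'a')
        | some b => (PySem.Chars.lowerChar a, PySem.Chars.lowerChar b))
    = (List.range (key.toList.length / 2)).map (pvPairAt key.toList) := by
  have hlen : PySem.Str.len key = (key.toList.length : Int) := rfl
  have hm : PySem.Int.floordiv (PySem.Str.len key) 2 = ((key.toList.length / 2 : Nat) : Int) := by
    rw [hlen]; simp [PySem.Int.floordiv, Int.fdiv_eq_ediv]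
  rw [hm, PySem.List.pyRange_one, List.map_map]
  apply List.map_congr_left
  intro k hk
  have hk' : k < key.toList.length / 2 := List.mem_range.mp hk
  have hkn : k < key.toList.length := lt_of_lt_of_le hk' (Nat.div_le_self _ _)
  simp only [Function.comp]
  have h1 : (0 : Int) + (k : Int) = ((k : Nat) : Int) := by omega
  have h2 : PySem.Str.len key - 1 - (k : Int) = ((key.toList.length - 1 - k : Nat) : Int) := by
    rw [hlen]; omega
  rw [h1, h2, PySem.List.pyGet?_natCast, PySem.List.pyGet?_natCast,
    List.getElem?_eq_getElem hkn, List.getElem?_eq_getElem (show key.toList.length - 1 - k < key.toList.length by omega)]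
  simp only [pvPairAt, List.getD_eq_getElem _ _ hkn,
    List.getD_eq_getElem _ _ (show key.toList.length - 1 - k < key.toList.length by omega)]

theorem pvPorts_eq (key : String) : createCipherMapping key = createCipherMapping_alt key := by
  unfold createCipherMapping createCipherMapping_alt
  simp only []
  have hid : ((PySem.List.pyRange 0 26 1).foldl (fun d i =>
      let char := String.singleton (Char.ofNat ('a'.toNat + i.toNat))
      d.insert char char) (PySem.Dict.empty : PySem.Dict String String)).items
      = pvLetters.map (fun c => (c, (PySem.Dict.empty : PySem.Dict String String).getD c c)) := by
    decide
  rw [pvAfold, pvBpairs]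
  have hinv := pvInv ((List.range (key.toList.length / 2)).map (pvPairAt key.toList)) _ _ hid
  rw [hinv]
  rw [show pvLetters = pvLc.map String.singleton from rfl, List.map_map]
  apply List.map_congr_left
  intro c _
  simp only [Function.comp]
  rw [pvSearch]
  have hq : (fun p : Char × Char =>
      decide ('a' ≤ p.1 ∧ p.1 ≤ 'z' ∧ 'a' ≤ p.2 ∧ p.2 ≤ 'z') && (p.1 == c || p.2 == c)) = pvQ c := rfl
  rw [hq]
  cases ((List.range (key.toList.length / 2)).map (pvPairAt key.toList)).reverse.find? (pvQ c) with
  | none => rfl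
  | some p => rfl

-- ===== VERDICT (by name: the statement is the Claim_ definition above) =====
theorem createCipherMapping_spec : Claim_equal_createCipherMapping := by
  intro key _
  unfold Spec_createCipherMapping
  exact pvPorts_eq key
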